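-- pv_equiv track=rewrite | github.com/bibliotecadebabel/EvAI | Geometric/Directions/DNA_directions_duplicate.py | select_new_index2retract
-- ===== SOURCE A (Python) =====
-- def select_new_index2retract(num_layer,landscape,size,old_index=None):
--     if len(landscape)<1:
--         if old_index:
--             contract=old_index-num_layer+1
--             if contract//2==0:
--                 return None
--             else:
--                 return num_layer+contract//2
--         else:
--             return None
--     else:
--         k=0
--         landscape_dif=[]
--         for dendrite in landscape:
--             if k==0:
--                 landscape_dif.append(dendrite)
--             else:
--                 landscape_dif.append(abs(dendrite-landscape[k-1]))
--             k=k+1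
--         spread=max(landscape_dif)
--         base_index=landscape_dif.index(spread)-1
--         if base_index==-1:
--             new_index=spread//2
--         else:
--             new_index=landscape[base_index]+spread//2
--         if not(new_index in landscape):
--             return num_layer+new_index+1
--         else:
--             return None
-- ===== SOURCE B (Python) =====
-- def select_new_index2retract(num_layer, landscape, size, old_index=None):
--     if len(landscape) < 1:
--         if old_index:
--             contract = old_index - num_layer + 1
--             if contract // 2 == 0:
--                 return None
--             return num_layer + contract // 2
--         return None
--     # single pass: running maximum of the difference landscape and its first position
--     spread = landscape[0]
--     best_k = 0
--     prev = landscape[0]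
--     for k in range(1, len(landscape)):
--         cur = landscape[k]
--         cand = abs(cur - prev)
--         if cand > spread:
--             spread = cand
--             best_k = k
--         prev = cur
--     if best_k == 0:
--         new_index = spread // 2
--     else:
--         new_index = landscape[best_k - 1] + spread // 2
--     if new_index in landscape:
--         return None
--     return num_layer + new_index + 1
-- ===== Notes on version B (the rewrite author's own statement) =====
-- stated objective: simpler
-- what changed: Replaces the build-a-difference-list, max(), then .index() three-pass scheme with one fused pass that tracks the running maximum difference and its first position directly (no intermediate list).
import Mathlib
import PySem

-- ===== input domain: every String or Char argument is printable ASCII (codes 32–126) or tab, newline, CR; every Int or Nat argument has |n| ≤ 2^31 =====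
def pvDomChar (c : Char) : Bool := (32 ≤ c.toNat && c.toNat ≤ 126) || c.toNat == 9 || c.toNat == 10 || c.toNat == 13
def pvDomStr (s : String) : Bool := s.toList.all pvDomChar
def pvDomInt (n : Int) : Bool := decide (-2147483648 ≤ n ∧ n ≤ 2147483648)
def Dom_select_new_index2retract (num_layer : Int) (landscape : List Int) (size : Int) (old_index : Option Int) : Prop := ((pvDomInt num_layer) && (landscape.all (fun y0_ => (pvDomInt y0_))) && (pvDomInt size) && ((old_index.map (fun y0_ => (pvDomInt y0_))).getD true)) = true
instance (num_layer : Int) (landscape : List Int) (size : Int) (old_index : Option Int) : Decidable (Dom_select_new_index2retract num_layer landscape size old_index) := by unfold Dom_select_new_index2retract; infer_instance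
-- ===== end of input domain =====

-- B fuses A's three passes (build the difference list, max(), .index()) into one loop
-- tracking the running maximum difference and its first position; return values proved equal.

-- ===== PORT A =====
def select_new_index2retract (num_layer : Int) (landscape : List Int) (size : Int) (old_index : Option Int) : Option Int :=
  if landscape.length < 1 then
    match old_index with
    | none => none
    | some oi =>
      if oi ≠ 0 then  -- Python truthiness of the int old_index
        let contract := oi - num_layer + 1
        if PySem.Int.floordiv contract 2 = 0 then none
        else some (num_layer + PySem.Int.floordiv contract 2)
      else none
  else
    let st := landscape.foldl (fun (st : Int × List Int) dendrite =>
        if st.1 = 0 then (st.1 + 1, st.2 ++ [dendrite])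
        else (st.1 + 1, st.2 ++ [|dendrite - (PySem.List.pyGet? landscape (st.1 - 1)).getD 0|]))
      (0, [])
    let landscape_dif := st.2
    match PySem.List.max? landscape_dif (fun y => y) with
    | none => none  -- unreachable: landscape_dif is nonempty
    | some spread =>
      match PySem.List.index? landscape_dif spread with
      | none => none  -- unreachable: spread ∈ landscape_dif
      | some idx =>
        let base_index : Int := (idx : Int) - 1
        let new_index := if base_index = -1 then PySem.Int.floordiv spread 2
          else (PySem.List.pyGet? landscape base_index).getD 0 + PySem.Int.floordiv spread 2
        if ¬ (new_index ∈ landscape) then some (num_layer + new_index + 1) else none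

-- ===== PORT B =====
-- single pass over the tail: state (prev, spread, best_k), current position k
def pvScanB (prev spread : Int) (bk k : Nat) : List Int → Int × Nat
  | [] => (spread, bk)
  | x :: rest =>
    let cand := |x - prev|
    if cand > spread then pvScanB x cand k (k + 1) rest
    else pvScanB x spread bk (k + 1) rest

def select_new_index2retract_alt (num_layer : Int) (landscape : List Int) (size : Int) (old_index : Option Int) : Option Int :=
  match landscape with
  | [] =>
    match old_index with
    | none => none
    | some oi =>
      if oi ≠ 0 then
        let contract := oi - num_layer + 1
        if PySem.Int.floordiv contract 2 = 0 then none
        else some (num_layer + PySem.Int.floordiv contract 2)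
      else none
  | h :: t =>
    let r := pvScanB h h 0 1 t
    let new_index := if r.2 = 0 then PySem.Int.floordiv r.1 2
      else (PySem.List.pyGet? landscape ((r.2 : Int) - 1)).getD 0 + PySem.Int.floordiv r.1 2
    if new_index ∈ landscape then none else some (num_layer + new_index + 1)

-- ===== PRECONDITION & SPEC =====
def Spec_select_new_index2retract (num_layer : Int) (landscape : List Int) (size : Int) (old_index : Option Int) (out : Option Int) : Prop := out = select_new_index2retract_alt num_layer landscape size old_index
instance (num_layer : Int) (landscape : List Int) (size : Int) (old_index : Option Int) (out : Option Int) : Decidable (Spec_select_new_index2retract num_layer landscape size old_index out) := by unfold Spec_select_new_index2retract; infer_instance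

-- ===== CLAIM (what is proved, stated in full; the proofs are below) =====
def Claim_equal_select_new_index2retract : Prop := ∀ (num_layer : Int) (landscape : List Int) (size : Int) (old_index : Option Int), Dom_select_new_index2retract num_layer landscape size old_index → Spec_select_new_index2retract num_layer landscape size old_index (select_new_index2retract num_layer landscape size old_index)

-- ===== LEMMAS AND PROOFS =====

-- the difference landscape of the tail, as a pure function (proof tool only)
def pvZipAbs (prev : Int) : List Int → List Int
  | [] => []
  | x :: r => |x - prev| :: pvZipAbs x r

-- A's fold, resumed at position p ≥ 1, appends pvZipAbs of the remaining suffix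
theorem pvFoldA (l : List Int) (s : List Int) :
    ∀ (p : Nat) (acc : List Int) (prev : Int), 1 ≤ p →
      PySem.List.pyGet? l ((p : Int) - 1) = some prev → l.drop p = s →
      s.foldl (fun (st : Int × List Int) dendrite =>
          if st.1 = 0 then (st.1 + 1, st.2 ++ [dendrite])
          else (st.1 + 1, st.2 ++ [|dendrite - (PySem.List.pyGet? l (st.1 - 1)).getD 0|]))
        ((p : Int), acc)
      = (((p + s.length : Nat) : Int), acc ++ pvZipAbs prev s) := by
  induction s with
  | nil => intro p acc prev _ _ _; simp [pvZipAbs]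
  | cons x r ih =>
    intro p acc prev hp hprev hdrop
    have hk0 : (p : Int) ≠ 0 := by omega
    have hx : l[p]? = some x := by
      rw [← List.head?_drop, hdrop]; rfl
    have hdrop' : l.drop (p + 1) = r := by
      rw [← List.tail_drop, hdrop]; rfl
    have hprev' : PySem.List.pyGet? l (((p + 1 : Nat) : Int) - 1) = some x := by
      have : ((p + 1 : Nat) : Int) - 1 = ((p : Nat) : Int) := by push_cast; ring
      rw [this, PySem.List.pyGet?_natCast, hx]
    simp only [List.foldl_cons, if_neg hk0, hprev, Option.getD_some]
    have hcast : (p : Int) + 1 = ((p + 1 : Nat) : Int) := by push_cast; ring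
    rw [hcast, ih (p + 1) (acc ++ [|x - prev|]) x (by omega) hprev' hdrop']
    refine Prod.ext ?_ ?_
    · push_cast; simp; omega
    · simp [pvZipAbs]

-- B's scan keeps the running maximum of the processed prefix and its first index
theorem pvScanB_spec :
    ∀ (t : List Int) (prev sp : Int) (bk : Nat) (P : List Int),
      sp ∈ P → (∀ y ∈ P, y ≤ sp) → PySem.List.index? P sp = some bk →
      (pvScanB prev sp bk P.length t).1 ∈ P ++ pvZipAbs prev t ∧
      (∀ y ∈ P ++ pvZipAbs prev t, y ≤ (pvScanB prev sp bk P.length t).1) ∧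
      PySem.List.index? (P ++ pvZipAbs prev t) (pvScanB prev sp bk P.length t).1
        = some (pvScanB prev sp bk P.length t).2 := by
  intro t
  induction t with
  | nil =>
    intro prev sp bk P hmem hmax hidx
    simp [pvScanB, pvZipAbs]
    exact ⟨hmem, hmax, hidx⟩
  | cons x r ih =>
    intro prev sp bk P hmem hmax hidx
    by_cases hgt : |x - prev| > sp
    · have hnot : |x - prev| ∉ P := fun hin => absurd (hmax _ hin) (by omega)
      have h1 : |x - prev| ∈ P ++ [|x - prev|] := by simp
      have h2 : ∀ y ∈ P ++ [|x - prev|], y ≤ |x - prev| := by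
        intro y hy
        rcases List.mem_append.mp hy with h | h
        · exact le_of_lt (lt_of_le_of_lt (hmax _ h) hgt)
        · simp at h; omega
      have h3 : PySem.List.index? (P ++ [|x - prev|]) (|x - prev|) = some P.length :=
        PySem.List.index?_append_singleton_self P _ hnot
      have := ih x (|x - prev|) P.length (P ++ [|x - prev|]) h1 h2 (by simpa using h3)
      simp only [List.length_append, List.length_cons, List.length_nil] at this
      simpa [pvScanB, hgt, pvZipAbs, List.append_assoc] using this
    · have h1 : sp ∈ P ++ [|x - prev|] := List.mem_append.mpr (Or.inl hmem)
      have h2 : ∀ y ∈ P ++ [|x - prev|], y ≤ sp := by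
        intro y hy
        rcases List.mem_append.mp hy with h | h
        · exact hmax _ h
        · simp at h; omega
      have h3 : PySem.List.index? (P ++ [|x - prev|]) sp = some bk := by
        rw [PySem.List.index?_append_of_mem _ hmem]; exact hidx
      have := ih x sp bk (P ++ [|x - prev|]) h1 h2 h3
      simp only [List.length_append, List.length_cons, List.length_nil] at this
      simpa [pvScanB, hgt, pvZipAbs, List.append_assoc] using this

-- the two ports agree on a nonempty landscape
theorem pv_main_cons (num_layer : Int) (h : Int) (t : List Int) (size : Int) (oi : Option Int) :
    select_new_index2retract num_layer (h :: t) size oi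
      = select_new_index2retract_alt num_layer (h :: t) size oi := by
  -- A's fold builds the difference list D
  have hprev : PySem.List.pyGet? (h :: t) (((1 : Nat) : Int) - 1) = some h := by
    norm_num [PySem.List.pyGet?_zero_cons]
  have hfold := pvFoldA (h :: t) t 1 [h] h (le_refl 1) hprev rfl
  set D := h :: pvZipAbs h t with hD
  -- A's max and first index over D
  obtain ⟨mA, hmA⟩ : ∃ m, PySem.List.max? D (fun y => y) = some m := by
    cases hm : PySem.List.max? D (fun y => y) with
    | none => exact absurd ((PySem.List.max?_eq_none_iff D (fun y => y)).mp hm) (by simp [hD])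
    | some m => exact ⟨m, rfl⟩
  have hmAmem : mA ∈ D := PySem.List.max?_mem hmA
  have hmAmax : ∀ y ∈ D, y ≤ mA := PySem.List.max?_isMax hmA
  obtain ⟨iA, hiA⟩ : ∃ i, PySem.List.index? D mA = some i := by
    cases hi : PySem.List.index? D mA with
    | none => exact absurd ((PySem.List.index?_isSome_iff D mA).mpr hmAmem) (by rw [hi]; simp)
    | some i => exact ⟨i, rfl⟩
  -- B's scan over the tail
  have hscan := pvScanB_spec t h h 0 [h] (by simp) (by simp) (PySem.List.index?_cons_self h [])
  simp only [List.length_cons, List.length_nil, List.singleton_append] at hscan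
  obtain ⟨hBmem, hBmax, hBidx⟩ := hscan
  -- the two extrema and indices coincide
  have hval : mA = (pvScanB h h 0 1 t).1 :=
    le_antisymm (hBmax _ hmAmem) (hmAmax _ hBmem)
  have hidx : iA = (pvScanB h h 0 1 t).2 := by
    rw [hval] at hiA
    have h2 := hBidx.symm.trans hiA
    exact (Option.some_inj.mp h2).symm
  -- evaluate port A
  rw [select_new_index2retract.eq_def, if_neg (by simp)]
  norm_num at hfold
  simp only [List.foldl_cons]
  norm_num [hfold]
  simp only [← hD, hmA]
  -- evaluate port B
  rw [select_new_index2retract_alt.eq_def]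
  simp only [hval]
  have hcond : ((pvScanB h h 0 1 t).2 : Int) - 1 = -1 ↔ (pvScanB h h 0 1 t).2 = 0 := by omega
  by_cases hz : (pvScanB h h 0 1 t).2 = 0
  · simp only [hz]
    norm_num
    split_ifs <;> simp_all <;> tauto
  · have : ¬ (((pvScanB h h 0 1 t).2 : Int) - 1 = -1) := by omega
    simp only [if_neg hz]
    split_ifs <;> simp_all <;> tauto

-- ===== VERDICT (by name: the statement is the Claim_ definition above) =====
theorem select_new_index2retract_spec : Claim_equal_select_new_index2retract := by
  intro num_layer landscape size old_index _
  unfold Spec_select_new_index2retract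
  cases landscape with
  | nil => rfl
  | cons h t => exact pv_main_cons num_layer h t size old_index
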